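-- pv_equiv track=rewrite | github.com/Gsparsh22/CodeForces | Problem Set/Prob_1097B.py | can_reach_zero
-- ===== SOURCE A (Python) =====
-- def can_reach_zero(n, rotations):
--     for mask in range(1 << n):
--         total_rotation = 0
--         for i in range(n):
--             if (mask >> i) & 1:
--                 total_rotation += rotations[i]
--             else:
--                 total_rotation -= rotations[i]
--         if total_rotation % 360 == 0:
--             return "YES"
--     return "NO"
-- ===== SOURCE B (Python) =====
-- def can_reach_zero(n, rotations):
--     reachable = {0}
--     i = 0
--     while i != n:
--         r = rotations[i]
--         reachable = {(x + r) % 360 for x in reachable} | {(x - r) % 360 for x in reachable}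
--         i += 1
--     return "YES" if 0 in reachable else "NO"
-- ===== Notes on version B (the rewrite author's own statement) =====
-- stated objective: alternative
-- what changed: Replaced the enumeration of all 2^n sign masks by a dynamic program over the set of residues mod 360 reachable after each rotation; not measurably faster on the probe's random inputs, where A's early return usually fires within a few hundred masks.
import Mathlib
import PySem

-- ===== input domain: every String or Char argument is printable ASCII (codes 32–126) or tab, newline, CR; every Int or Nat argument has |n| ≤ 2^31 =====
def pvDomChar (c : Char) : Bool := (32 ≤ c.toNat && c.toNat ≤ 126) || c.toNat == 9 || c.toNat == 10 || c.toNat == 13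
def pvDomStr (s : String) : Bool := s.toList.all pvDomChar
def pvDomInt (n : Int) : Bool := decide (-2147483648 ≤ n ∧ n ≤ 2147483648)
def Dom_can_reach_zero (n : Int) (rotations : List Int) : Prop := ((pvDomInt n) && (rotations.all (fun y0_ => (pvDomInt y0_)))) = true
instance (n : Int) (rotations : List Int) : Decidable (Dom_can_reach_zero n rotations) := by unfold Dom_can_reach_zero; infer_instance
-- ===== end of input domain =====

-- B replaces A's enumeration of all 2^n sign masks by a DP over the set of residues mod 360
-- reachable after each rotation (objective: a genuinely different algorithm of the same measured cost).


-- ===== PORT A =====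
-- total_rotation for one mask: the inner 'for i in range(n)' loop of A
def pvInner (n : Int) (rotations : List Int) (mask : Int) : Int :=
  (PySem.List.pyRange 0 n 1).foldl (fun total i =>
    if PySem.Int.band (mask >>> i.toNat) 1 ≠ 0 then total + PySem.List.pyGetD rotations i 0
    else total - PySem.List.pyGetD rotations i 0) 0

-- the outer 'for mask in range(1 << n)' loop with its early 'return "YES"'
def pvAGo (n : Int) (rotations : List Int) : List Int → String
  | [] => "NO"
  | m :: ms =>
      if PySem.Int.mod (pvInner n rotations m) 360 = 0 then "YES" else pvAGo n rotations ms

def can_reach_zero (n : Int) (rotations : List Int) : String :=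
  pvAGo n rotations (PySem.List.pyRange 0 ((1 : Int) <<< n.toNat) 1)

-- ===== PORT B =====
-- one DP step: {(x+r)%360 for x in reachable} | {(x-r)%360 for x in reachable}
def pvStep (reachable : PySem.Set Int) (r : Int) : PySem.Set Int :=
  PySem.Set.union (PySem.Set.ofList (reachable.map (fun x => PySem.Int.mod (x + r) 360)))
                  (PySem.Set.ofList (reachable.map (fun x => PySem.Int.mod (x - r) 360)))

-- B's 'i = 0; while i != n: … i += 1' visits i = 0,…,n-1 (on the admitted inputs, where
-- 0 ≤ n): ported as a fold over pyRange 0 n 1; where n < 0 Python B raises (outside Pre_).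
def can_reach_zero_alt (n : Int) (rotations : List Int) : String :=
  let reachable := (PySem.List.pyRange 0 n 1).foldl
    (fun s i => pvStep s (PySem.List.pyGetD rotations i 0)) (PySem.Set.ofList [0])
  if PySem.Set.contains reachable 0 then "YES" else "NO"

-- ===== PRECONDITION & SPEC =====
-- Pre_ excludes exactly the inputs where A raises: n < 0 (ValueError from 1 << n)
-- and n > len(rotations) (IndexError from rotations[i]).
def Pre_can_reach_zero (n : Int) (rotations : List Int) : Prop :=
  0 ≤ n ∧ n ≤ rotations.length
instance (n : Int) (rotations : List Int) : Decidable (Pre_can_reach_zero n rotations) := by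
  unfold Pre_can_reach_zero; infer_instance

def pvWitness_can_reach_zero : Int × List Int := (2, [90, 270])

def Spec_can_reach_zero (n : Int) (rotations : List Int) (out : String) : Prop := out = can_reach_zero_alt n rotations
instance (n : Int) (rotations : List Int) (out : String) : Decidable (Spec_can_reach_zero n rotations out) := by unfold Spec_can_reach_zero; infer_instance

-- ===== CLAIM (what is proved, stated in full; the proofs are below) =====
def Claim_equal_can_reach_zero : Prop := ∀ (n : Int) (rotations : List Int), Dom_can_reach_zero n rotations → Pre_can_reach_zero n rotations → Spec_can_reach_zero n rotations (can_reach_zero n rotations)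

-- ===== LEMMAS AND PROOFS =====

-- signed sum selected by the bits of a mask, low bit first
def pvSigned : List Int → Nat → Int
  | [], _ => 0
  | r :: l, m => (if m % 2 = 1 then r else -r) + pvSigned l (m / 2)

-- residue chain: apply ±r then reduce mod 360 at each step, as B's DP does
def pvMC : List Int → Int → Nat → Int
  | [], y, _ => y
  | r :: l, y, m => pvMC l (PySem.Int.mod (if m % 2 = 1 then y + r else y - r) 360) (m / 2)

theorem pvMod_add (a b : Int) :
    PySem.Int.mod (PySem.Int.mod a 360 + b) 360 = PySem.Int.mod (a + b) 360 := by
  rw [PySem.Int.mod_eq_emod_of_pos (by omega), PySem.Int.mod_eq_emod_of_pos (by omega),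
    PySem.Int.mod_eq_emod_of_pos (by omega), Int.emod_add_emod]

theorem pvAGo_eq (n : Int) (rot : List Int) (l : List Int) :
    pvAGo n rot l =
      if ∃ m ∈ l, PySem.Int.mod (pvInner n rot m) 360 = 0 then "YES" else "NO" := by
  induction l with
  | nil => simp [pvAGo]
  | cons m ms ih =>
      simp only [pvAGo, ih]
      by_cases h : PySem.Int.mod (pvInner n rot m) 360 = 0
      · rw [if_pos h, if_pos ⟨m, by simp, h⟩]
      · rw [if_neg h]
        by_cases h2 : ∃ x ∈ ms, PySem.Int.mod (pvInner n rot x) 360 = 0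
        · obtain ⟨x, hx, hp⟩ := h2
          rw [if_pos ⟨x, hx, hp⟩, if_pos ⟨x, List.mem_cons_of_mem _ hx, hp⟩]
        · rw [if_neg h2, if_neg (by
            rintro ⟨x, hx, hp⟩
            rcases List.mem_cons.mp hx with rfl | hx'
            · exact h hp
            · exact h2 ⟨x, hx', hp⟩)]

theorem pvSigned_append (l1 l2 : List Int) (m : Nat) :
    pvSigned (l1 ++ l2) m = pvSigned l1 m + pvSigned l2 (m >>> l1.length) := by
  induction l1 generalizing m with
  | nil => simp [pvSigned]
  | cons r l ih =>
      simp only [List.cons_append, pvSigned, ih, List.length_cons]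
      have : m >>> (l.length + 1) = (m / 2) >>> l.length := by
        rw [Nat.add_comm, Nat.shiftRight_add, Nat.shiftRight_one]
      rw [this]; ring

theorem pvInner_eq_signed (rot : List Int) (k : Nat) (hk : k ≤ rot.length) (m : Nat) :
    pvInner (k : Int) rot (m : Int) = pvSigned (rot.take k) m := by
  induction k with
  | zero => simp [pvInner, PySem.List.pyRange_one_eq_nil, pvSigned]
  | succ k ih =>
      have hk' : k ≤ rot.length := Nat.le_of_succ_le hk
      have hklt : k < rot.length := hk
      have hrange : PySem.List.pyRange 0 ((k : Int) + 1) 1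
          = PySem.List.pyRange 0 (k : Int) 1 ++ [(k : Int)] :=
        PySem.List.pyRange_one_succ_right (by exact_mod_cast Nat.zero_le k)
      have hcast : ((k + 1 : Nat) : Int) = (k : Int) + 1 := by push_cast; ring
      simp only [pvInner] at ih ⊢
      rw [hcast, hrange, List.foldl_append]
      rw [ih hk']
      have htake : rot.take (k + 1) = rot.take k ++ [rot[k]] := by
        rw [List.take_add_one]; simp [List.getElem?_eq_getElem hklt]
      rw [htake, pvSigned_append, List.length_take_of_le hk']
      have hget : PySem.List.pyGetD rot ((k : Int)) (0 : Int) = rot[k] := by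
        simp [PySem.List.pyGetD_natCast, List.getD_eq_getElem?_getD,
          List.getElem?_eq_getElem hklt]
      have hband : PySem.Int.band (((m : Nat) : Int) >>> ((k : Nat) : Int)) 1
          = (((m >>> k) % 2 : Nat) : Int) := by
        rw [show (((m : Nat) : Int) >>> ((k : Nat) : Int)) = (((m >>> k : Nat) : Nat) : Int) by
          simp [Int.shiftRight_eq, Int.natCast_shiftRight]]
        rw [show (1 : Int) = ((1 : Nat) : Int) from rfl, PySem.Int.band_natCast,
          Nat.and_one_is_mod]
      simp only [List.foldl_cons, List.foldl_nil, Int.toNat_natCast, hband, hget, pvSigned]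
      by_cases hb : (m >>> k) % 2 = 1
      · rw [if_pos (by rw [hb]; decide), if_pos hb]; ring
      · have hb0 : (m >>> k) % 2 = 0 := Nat.mod_two_ne_one.mp hb
        rw [if_neg (by rw [hb0]; decide), if_neg hb]; ring

theorem pvMC_eq_mod (l : List Int) (m : Nat) (y : Int) :
    pvMC l (PySem.Int.mod y 360) m = PySem.Int.mod (y + pvSigned l m) 360 := by
  induction l generalizing y m with
  | nil => simp [pvMC, pvSigned]
  | cons r l ih =>
      simp only [pvMC, pvSigned]
      by_cases hb : m % 2 = 1
      · rw [if_pos hb, if_pos hb, pvMod_add, ih]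
        congr 1; ring
      · have hsub : PySem.Int.mod (PySem.Int.mod y 360 - r) 360
            = PySem.Int.mod (y - r) 360 := by
          have h := pvMod_add y (-r)
          rw [sub_eq_add_neg, sub_eq_add_neg, h]
        rw [if_neg hb, if_neg hb, hsub, ih]
        congr 1; ring

theorem pvMC_zero (l : List Int) (m : Nat) :
    pvMC l 0 m = PySem.Int.mod (pvSigned l m) 360 := by
  have h := pvMC_eq_mod l m 0
  simpa [show PySem.Int.mod 0 360 = (0 : Int) from by decide] using h

theorem pvFold_mem (l : List Int) (s : PySem.Set Int) (x : Int) :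
    x ∈ l.foldl pvStep s ↔ ∃ y ∈ s, ∃ m < 2 ^ l.length, x = pvMC l y m := by
  induction l generalizing s with
  | nil =>
      simp only [List.foldl_nil, List.length_nil, pow_zero, Nat.lt_one_iff, pvMC]
      constructor
      · intro hx; exact ⟨x, hx, 0, rfl, rfl⟩
      · rintro ⟨y, hy, m, rfl, rfl⟩; exact hy
  | cons r l ih =>
      simp only [List.foldl_cons, ih, List.length_cons]
      constructor
      · rintro ⟨y', hy', m', hm', hx⟩
        have : y' ∈ PySem.Set.union
            (PySem.Set.ofList (s.map (fun x => PySem.Int.mod (x + r) 360)))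
            (PySem.Set.ofList (s.map (fun x => PySem.Int.mod (x - r) 360))) := hy'
        rw [PySem.Set.mem_union, PySem.Set.mem_ofList, PySem.Set.mem_ofList] at this
        rcases this with h | h
        · rcases List.mem_map.mp h with ⟨y, hy, rfl⟩
          refine ⟨y, hy, 2 * m' + 1, by rw [pow_succ]; omega, ?_⟩
          simp only [pvMC]
          have h2 : (2 * m' + 1) % 2 = 1 := by omega
          have h3 : (2 * m' + 1) / 2 = m' := by omega
          rw [h2, h3]; simpa using hx
        · rcases List.mem_map.mp h with ⟨y, hy, rfl⟩
          refine ⟨y, hy, 2 * m', by rw [pow_succ]; omega, ?_⟩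
          simp only [pvMC]
          have h2 : (2 * m') % 2 = 0 := by omega
          have h3 : (2 * m') / 2 = m' := by omega
          rw [h2, h3]; simpa using hx
      · rintro ⟨y, hy, m, hm, hx⟩
        simp only [pvMC] at hx
        refine ⟨PySem.Int.mod (if m % 2 = 1 then y + r else y - r) 360, ?_, m / 2,
          by rw [pow_succ] at hm; omega, hx⟩
        show _ ∈ PySem.Set.union _ _
        rw [PySem.Set.mem_union, PySem.Set.mem_ofList, PySem.Set.mem_ofList]
        by_cases hb : m % 2 = 1
        · exact Or.inl (List.mem_map.mpr ⟨y, hy, by rw [if_pos hb]⟩)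
        · exact Or.inr (List.mem_map.mpr ⟨y, hy, by rw [if_neg hb]⟩)

-- ===== VERDICT (by name: the statement is the Claim_ definition above) =====
theorem can_reach_zero_spec : Claim_equal_can_reach_zero := by
  intro n rot _ hpre
  obtain ⟨hn0, hnlen⟩ := hpre
  set k : Nat := n.toNat with hkdef
  have hn : n = (k : Int) := (Int.toNat_of_nonneg hn0).symm
  have hklen : k ≤ rot.length := by omega
  show can_reach_zero n rot = can_reach_zero_alt n rot
  have hshift : ((1 : Int) <<< k) = ((2 ^ k : Nat) : Int) := by
    push_cast; simp [Int.shiftLeft_eq]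
  have hrhs : can_reach_zero_alt n rot
      = if PySem.Set.contains ((rot.take k).foldl pvStep (PySem.Set.ofList [0])) 0
        then "YES" else "NO" := by
    rw [hn]
    show (if PySem.Set.contains
        ((PySem.List.pyRange 0 ((k : Nat) : Int) 1).foldl
          (fun s i => pvStep s (PySem.List.pyGetD rot i 0)) (PySem.Set.ofList [0])) 0 = true
      then "YES" else "NO") = _
    have hsame : (PySem.List.pyRange 0 ((k : Nat) : Int) 1).foldl
        (fun s i => pvStep s (PySem.List.pyGetD rot i 0)) (PySem.Set.ofList [0])
        = (PySem.List.pyRange 0 ((k : Nat) : Int) 1).foldl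
        (fun s i => pvStep s (PySem.List.pyGetD (rot.take k) i 0)) (PySem.Set.ofList [0]) := by
      apply PySem.List.foldl_congr_mem
      intro acc i hi
      rw [PySem.List.mem_pyRange_one] at hi
      obtain ⟨h0, hik⟩ := hi
      have hikN : i.toNat < k := by omega
      rw [PySem.List.pyGetD_eq_getElem rot 0 h0 (by omega),
        PySem.List.pyGetD_eq_getElem (rot.take k) 0 h0
          (by rw [List.length_take_of_le hklen]; omega),
        List.getElem_take]
    rw [hsame]
    rw [show ((k : Nat) : Int) = ((rot.take k).length : Int) by
      rw [List.length_take_of_le hklen]]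
    rw [PySem.List.foldl_pyRange_zero_pyGetD' (rot.take k) 0
      (fun s r => pvStep s r) (PySem.Set.ofList [0])]
  rw [hrhs, hn]
  unfold can_reach_zero
  rw [Int.toNat_natCast, hshift, pvAGo_eq]
  have hlen_take : (rot.take k).length = k := List.length_take_of_le hklen
  have hiff :
      (∃ m ∈ PySem.List.pyRange 0 ((2 ^ k : Nat) : Int) 1,
          PySem.Int.mod (pvInner ((k : Nat) : Int) rot m) 360 = 0)
      ↔ PySem.Set.contains ((rot.take k).foldl pvStep (PySem.Set.ofList [0])) 0 = true := by
    rw [PySem.Set.contains_iff, pvFold_mem]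
    constructor
    · rintro ⟨m, hm, hmod⟩
      rw [PySem.List.mem_pyRange_one] at hm
      obtain ⟨hm0, hmlt⟩ := hm
      have hmN : m = ((m.toNat : Nat) : Int) := (Int.toNat_of_nonneg hm0).symm
      have hmNlt : m.toNat < 2 ^ k := by omega
      rw [hmN, pvInner_eq_signed rot k hklen m.toNat] at hmod
      refine ⟨0, by simp [PySem.Set.mem_ofList], m.toNat, by rw [hlen_take]; exact hmNlt, ?_⟩
      rw [pvMC_zero]; exact hmod.symm
    · rintro ⟨y, hy, m, hm, hx⟩
      have hy0 : y = 0 := by simpa [PySem.Set.mem_ofList] using hy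
      subst hy0
      rw [hlen_take] at hm
      rw [pvMC_zero] at hx
      refine ⟨((m : Nat) : Int), ?_, ?_⟩
      · rw [PySem.List.mem_pyRange_one]
        exact ⟨by exact_mod_cast Nat.zero_le m, by exact_mod_cast hm⟩
      · rw [pvInner_eq_signed rot k hklen m]
        exact hx.symm
  by_cases h : ∃ m ∈ PySem.List.pyRange 0 ((2 ^ k : Nat) : Int) 1,
      PySem.Int.mod (pvInner ((k : Nat) : Int) rot m) 360 = 0
  · rw [if_pos h, if_pos (hiff.mp h)]
  · rw [if_neg h, if_neg (fun hc => h (hiff.mpr hc))]
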